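-- pv_equiv track=rewrite | github.com/TSC-DEV-2026/ZionDocs-Backend | app/routers/docs_db.py | _numero_ate_999
-- ===== SOURCE A (Python) =====
-- def _numero_ate_999(n: int) -> str:
--     unidades = [
--         "", "um", "dois", "três", "quatro", "cinco", "seis", "sete", "oito", "nove"
--     ]
--     especiais = [
--         "dez", "onze", "doze", "treze", "quatorze", "quinze",
--         "dezesseis", "dezessete", "dezoito", "dezenove"
--     ]
--     dezenas = [
--         "", "", "vinte", "trinta", "quarenta", "cinquenta",
--         "sessenta", "setenta", "oitenta", "noventa"
--     ]
--     centenas = [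
--         "", "cento", "duzentos", "trezentos", "quatrocentos",
--         "quinhentos", "seiscentos", "setecentos", "oitocentos", "novecentos"
--     ]
--
--     if n == 0:
--         return ""
--     if n == 100:
--         return "cem"
--     if n < 10:
--         return unidades[n]
--     if n < 20:
--         return especiais[n - 10]
--     if n < 100:
--         d, u = divmod(n, 10)
--         return dezenas[d] if u == 0 else f"{dezenas[d]} e {unidades[u]}"
--
--     c, r = divmod(n, 100)
--     if r == 0:
--         return centenas[c]
--     return f"{centenas[c]} e {_numero_ate_999(r)}"
-- ===== SOURCE B (Python) =====
-- _UNIDADES = [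
--     "", "um", "dois", "três", "quatro", "cinco", "seis", "sete", "oito", "nove"
-- ]
-- _ESPECIAIS = [
--     "dez", "onze", "doze", "treze", "quatorze", "quinze",
--     "dezesseis", "dezessete", "dezoito", "dezenove"
-- ]
-- _DEZENAS = [
--     "", "", "vinte", "trinta", "quarenta", "cinquenta",
--     "sessenta", "setenta", "oitenta", "noventa"
-- ]
-- _CENTENAS = [
--     "", "cento", "duzentos", "trezentos", "quatrocentos",
--     "quinhentos", "seiscentos", "setecentos", "oitocentos", "novecentos"
-- ]
--
-- # The full word table, built ONCE at import time: row c holds the words for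
-- # 100*c .. 100*c+99.  Row 0 is the 0-99 words; rows 1-9 are composed from them.
-- _DOIS = _UNIDADES + _ESPECIAIS + [
--     _DEZENAS[d] if u == 0 else _DEZENAS[d] + " e " + _UNIDADES[u]
--     for d in range(2, 10) for u in range(10)
-- ]
-- _PALAVRAS = [_DOIS] + [
--     [
--         "cem" if 100 * c + r == 100
--         else (_CENTENAS[c] if r == 0 else _CENTENAS[c] + " e " + _DOIS[r])
--         for r in range(100)
--     ]
--     for c in range(1, 10)
-- ]
--
--
-- def _numero_ate_999(n: int) -> str:
--     return _PALAVRAS[n // 100][n % 100]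
-- ===== Notes on version B (the rewrite author's own statement) =====
-- stated objective: alternative
-- what changed: Replaces A's branch chain with recursive self-call by a full 10x100 word table precomputed once at module level (row 0 = the 0-99 words, rows 1-9 composed from them); the function body is a single double-indexed lookup _PALAVRAS[n // 100][n % 100].
-- outside the precondition, e.g. on _numero_ate_999(-3): A returns 'sete', B returns 'novecentos e noventa e sete'; on _numero_ate_999(-10): A returns '', B returns 'novecentos e noventa'
import Mathlib
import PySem

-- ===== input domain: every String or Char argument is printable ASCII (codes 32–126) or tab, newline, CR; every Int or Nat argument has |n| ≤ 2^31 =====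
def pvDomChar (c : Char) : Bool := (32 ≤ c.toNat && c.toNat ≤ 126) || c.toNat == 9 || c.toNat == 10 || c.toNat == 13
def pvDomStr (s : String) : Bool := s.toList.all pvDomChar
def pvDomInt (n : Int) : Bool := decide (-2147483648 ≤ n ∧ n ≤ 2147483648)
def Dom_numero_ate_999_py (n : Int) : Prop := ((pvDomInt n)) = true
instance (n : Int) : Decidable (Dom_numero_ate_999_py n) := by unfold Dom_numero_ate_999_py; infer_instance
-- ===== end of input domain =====

-- B precomputes the whole 0-999 word table once (row c = words for 100c..100c+99, rows 1-9
-- composed from the 0-99 row) so the function is a single double-indexed table lookup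
-- instead of A's recursive branch chain (objective: alternative).


-- shared word tables (plain data, used by both ports)
def pvUnidades : List String :=
  ["", "um", "dois", "três", "quatro", "cinco", "seis", "sete", "oito", "nove"]
def pvEspeciais : List String :=
  ["dez", "onze", "doze", "treze", "quatorze", "quinze",
   "dezesseis", "dezessete", "dezoito", "dezenove"]
def pvDezenas : List String :=
  ["", "", "vinte", "trinta", "quarenta", "cinquenta",
   "sessenta", "setenta", "oitenta", "noventa"]
def pvCentenas : List String :=
  ["", "cento", "duzentos", "trezentos", "quatrocentos",
   "quinhentos", "seiscentos", "setecentos", "oitocentos", "novecentos"]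

-- ===== PORT A =====
-- literal port of A: early-return chain with a recursive call on the sub-hundred remainder;
-- the f-string "{x} e {y}" is ported as PySem.Str.join " e " [x, y] (exact concatenation);
-- the Nat fuel only makes the recursion structural (fuel 2 is never exhausted: the one
-- recursive call receives r < 100, which never recurses again)
def pvNum999go : Nat → Int → String
  | 0, _ => ""
  | fuel + 1, n =>
    if n = 0 then ""
    else if n = 100 then "cem"
    else if n < 10 then PySem.List.pyGetD pvUnidades n ""
    else if n < 20 then PySem.List.pyGetD pvEspeciais (n - 10) ""
    else if n < 100 then
      let d := PySem.Int.floordiv n 10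
      let u := PySem.Int.mod n 10
      if u = 0 then PySem.List.pyGetD pvDezenas d ""
      else PySem.Str.join " e " [PySem.List.pyGetD pvDezenas d "", PySem.List.pyGetD pvUnidades u ""]
    else
      let c := PySem.Int.floordiv n 100
      let r := PySem.Int.mod n 100
      if r = 0 then PySem.List.pyGetD pvCentenas c ""
      else PySem.Str.join " e " [PySem.List.pyGetD pvCentenas c "", pvNum999go fuel r]

def numero_ate_999_py (n : Int) : String := pvNum999go 2 n

-- ===== PORT B =====
-- Source B's module-level table: _DOIS (words 0-99, a comprehension over the digit ranges) and
-- _PALAVRAS (_DOIS as row 0, then one row per hundreds digit 1-9); Python string '+' chains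
-- x + " e " + y are ported as PySem.Str.join " e " [x, y] (exact concatenation)
def pvDois : List String :=
  pvUnidades ++ pvEspeciais ++
    (PySem.List.pyRange 2 10 1).flatMap (fun d =>
      (PySem.List.pyRange 0 10 1).map (fun u =>
        if u = 0 then PySem.List.pyGetD pvDezenas d ""
        else PySem.Str.join " e " [PySem.List.pyGetD pvDezenas d "", PySem.List.pyGetD pvUnidades u ""]))

def pvRow (c : Int) : List String :=
  (PySem.List.pyRange 0 100 1).map (fun r =>
    if 100 * c + r = 100 then "cem"
    else if r = 0 then PySem.List.pyGetD pvCentenas c ""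
    else PySem.Str.join " e " [PySem.List.pyGetD pvCentenas c "", PySem.List.pyGetD pvDois r ""])

def pvPalavras : List (List String) :=
  [pvDois] ++ (PySem.List.pyRange 1 10 1).map pvRow

-- _PALAVRAS[n // 100][n % 100]; pyGetD is total where Python's [] raises, which Pre_ excludes
def numero_ate_999_py_alt (n : Int) : String :=
  PySem.List.pyGetD (PySem.List.pyGetD pvPalavras (PySem.Int.floordiv n 100) [])
    (PySem.Int.mod n 100) ""

-- ===== PRECONDITION & SPEC =====
-- Pre_ restricts to the converter's stated domain 0–999: above 999 both raise IndexError, and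
-- on negative inputs (outside the function's purpose) A's and B's values are both accidental
-- negative-index-wraparound artefacts that no caller would specify (see cites).
def Pre_numero_ate_999_py (n : Int) : Prop := 0 ≤ n ∧ n ≤ 999
instance (n : Int) : Decidable (Pre_numero_ate_999_py n) := by unfold Pre_numero_ate_999_py; infer_instance
def pvWitness_numero_ate_999_py : Int := (123)

def Spec_numero_ate_999_py (n : Int) (out : String) : Prop := out = numero_ate_999_py_alt n
instance (n : Int) (out : String) : Decidable (Spec_numero_ate_999_py n out) := by unfold Spec_numero_ate_999_py; infer_instance

-- ===== CLAIM =====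
def Claim_equal_numero_ate_999_py : Prop := ∀ (n : Int), Dom_numero_ate_999_py n → Pre_numero_ate_999_py n → Spec_numero_ate_999_py n (numero_ate_999_py n)

-- ===== LEMMAS AND PROOFS =====

-- agreement on 0-100 (row 0 and the 'cem' cell), by kernel evaluation
set_option maxRecDepth 100000 in
theorem pv_agree_le100 : ∀ k ∈ List.range 101,
    numero_ate_999_py (k : Int) = numero_ate_999_py_alt (k : Int) := by
  decide

-- row 0-99 of the table is A's inner recursive call (fuel 1), by kernel evaluation
set_option maxRecDepth 100000 in
theorem pv_dois_eq_go1 : ∀ k ∈ List.range 100,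
    PySem.List.pyGetD pvDois (k : Int) "" = pvNum999go 1 (k : Int) := by
  decide

-- extracting row c of the table, 1 ≤ c ≤ 9
theorem pv_row_extract (k : Nat) (hk : k < 9) :
    PySem.List.pyGetD pvPalavras ((k : Int) + 1) [] = pvRow (1 + k) := by
  have h1 : ((k : Int) + 1) = ((k + 1 : Nat) : Int) := by push_cast; ring
  rw [h1, PySem.List.pyGetD_natCast]
  show (pvDois :: (PySem.List.pyRange 1 10 1).map pvRow).getD (k + 1) [] = pvRow (1 + k)
  rw [List.getD_cons_succ, ← PySem.List.pyGetD_natCast]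
  exact PySem.List.pyGetD_map_pyRange_one pvRow 1 10 k [] (by omega)

-- the symbolic case 100 < n ≤ 999
theorem pv_agree_big (n : Int) (h1 : 100 < n) (h2 : n ≤ 999) :
    numero_ate_999_py n = numero_ate_999_py_alt n := by
  have hr0 : 0 ≤ PySem.Int.mod n 100 := PySem.Int.mod_nonneg n (by norm_num)
  have hr1 : PySem.Int.mod n 100 < 100 := PySem.Int.mod_lt n (by norm_num)
  have hc1 : (1 : Int) ≤ PySem.Int.floordiv n 100 :=
    (PySem.Int.le_floordiv_iff_mul_le (by norm_num)).mpr (by omega)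
  have hrec : PySem.Int.floordiv n 100 * 100 + PySem.Int.mod n 100 = n :=
    PySem.Int.floordiv_mul_add_mod n 100
  have hc9 : PySem.Int.floordiv n 100 ≤ 9 := by omega
  -- B's side: extract the row, then the cell
  have hrow : PySem.List.pyGetD pvPalavras (PySem.Int.floordiv n 100) [] =
      pvRow (PySem.Int.floordiv n 100) := by
    have hk : PySem.Int.floordiv n 100 = ((PySem.Int.floordiv n 100 - 1).toNat : Int) + 1 := by
      omega
    rw [hk, pv_row_extract (PySem.Int.floordiv n 100 - 1).toNat (by omega)]
    congr 1
    omega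
  have hcell : PySem.List.pyGetD (pvRow (PySem.Int.floordiv n 100)) (PySem.Int.mod n 100) "" =
      (if 100 * PySem.Int.floordiv n 100 + PySem.Int.mod n 100 = 100 then "cem"
       else if PySem.Int.mod n 100 = 0 then
         PySem.List.pyGetD pvCentenas (PySem.Int.floordiv n 100) ""
       else PySem.Str.join " e " [PySem.List.pyGetD pvCentenas (PySem.Int.floordiv n 100) "",
         PySem.List.pyGetD pvDois (PySem.Int.mod n 100) ""]) := by
    exact PySem.List.pyGetD_map_pyRange_of_nonneg _ 100 (PySem.Int.mod n 100) "" hr0 hr1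
  show pvNum999go 2 n = numero_ate_999_py_alt n
  rw [numero_ate_999_py_alt, hrow, hcell, pvNum999go]
  rw [if_neg (by omega), if_neg (by omega), if_neg (by omega), if_neg (by omega),
      if_neg (by omega : ¬ n < 100), if_neg (by omega : ¬ 100 * PySem.Int.floordiv n 100 + PySem.Int.mod n 100 = 100)]
  by_cases hr : PySem.Int.mod n 100 = 0
  · rw [if_pos hr, if_pos hr]
  · rw [if_neg hr, if_neg hr]
    have hcast : PySem.Int.mod n 100 = ((PySem.Int.mod n 100).toNat : Int) := by omega
    rw [hcast, pv_dois_eq_go1 (PySem.Int.mod n 100).toNat (List.mem_range.mpr (by omega))]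

-- ===== VERDICT =====
theorem numero_ate_999_py_spec : Claim_equal_numero_ate_999_py := by
  intro n _ hpre
  obtain ⟨h0, h1⟩ := hpre
  rw [Spec_numero_ate_999_py]
  by_cases hsmall : n ≤ 100
  · have hk : n = ((n.toNat : Nat) : Int) := by omega
    rw [hk]
    exact pv_agree_le100 n.toNat (List.mem_range.mpr (by omega))
  · exact pv_agree_big n (by omega) h1
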